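-- pv_equiv track=rewrite | github.com/liuxuf112/cs362_finalProject | task.py | conv_big_endian
-- ===== SOURCE A (Python) =====
-- def conv_big_endian(hex_list):
--     """ Converts a list hex characters to the string representation in big endian order and returns it. """
--     big_hex_string = ""
--     pair_count = 0
--     for character in hex_list:
--         # If this character would be the third in a row, inserts a space before adding the character.
--         if pair_count == 2:
--             big_hex_string += ' '
--             pair_count = 0
--
--         big_hex_string += str(character)
--         pair_count += 1
--
--     return big_hex_string
-- ===== SOURCE B (Python) =====
-- def conv_big_endian(hex_list):
--     """ Converts a list hex characters to the string representation in big endian order and returns it. """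
--     pairs = []
--     for i in range(0, len(hex_list), 2):
--         pairs.append(''.join(str(c) for c in hex_list[i:i+2]))
--     return ' '.join(pairs)
-- ===== Notes on version B (the rewrite author's own statement) =====
-- stated objective: idiomatic
-- what changed: Replaces the per-character running pair counter with a stride-2 grouping: slice the list in chunks of two and join the chunk strings with spaces.
import Mathlib
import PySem

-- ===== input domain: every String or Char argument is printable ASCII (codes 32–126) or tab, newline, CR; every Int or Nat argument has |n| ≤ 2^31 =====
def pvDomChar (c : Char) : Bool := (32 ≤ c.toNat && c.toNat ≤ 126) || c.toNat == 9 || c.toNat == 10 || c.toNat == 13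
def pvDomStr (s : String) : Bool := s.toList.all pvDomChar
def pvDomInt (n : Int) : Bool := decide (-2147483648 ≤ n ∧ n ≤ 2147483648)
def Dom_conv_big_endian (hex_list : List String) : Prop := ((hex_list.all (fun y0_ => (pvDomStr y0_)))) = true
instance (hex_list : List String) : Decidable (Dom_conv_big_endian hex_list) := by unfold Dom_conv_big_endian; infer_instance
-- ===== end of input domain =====

-- B replaces A's per-character running pair counter with a stride-2 chunking (slices of two joined by spaces); objective: idiomatic.

-- ===== PORT A =====
-- loop body of A: possibly insert a space when a pair is complete, then append the character
def pvStepA (st : List Char × Int) (character : String) : List Char × Int :=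
  let st' := if st.2 == 2 then (st.1 ++ [' '], (0 : Int)) else st
  (st'.1 ++ character.toList, st'.2 + 1)

def conv_big_endian (hex_list : List String) : String :=
  String.ofList (hex_list.foldl pvStepA ([], 0)).1

-- ===== PORT B =====
def conv_big_endian_alt (hex_list : List String) : String :=
  let pairs := (PySem.List.pyRange 0 (hex_list.length : Int) 2).map
    (fun i => PySem.Str.join "" (PySem.List.slice hex_list (some i) (some (i + 2))))
  PySem.Str.join " " pairs

-- ===== PRECONDITION & SPEC =====
def Spec_conv_big_endian (hex_list : List String) (out : String) : Prop := out = conv_big_endian_alt hex_list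
instance (hex_list : List String) (out : String) : Decidable (Spec_conv_big_endian hex_list out) := by unfold Spec_conv_big_endian; infer_instance

-- ===== CLAIM (what is proved, stated in full; the proofs are below) =====
def Claim_equal_conv_big_endian : Prop := ∀ (hex_list : List String), Dom_conv_big_endian hex_list → Spec_conv_big_endian hex_list (conv_big_endian hex_list)

-- ===== LEMMAS AND PROOFS =====

-- the pairs of hex_list, as char lists, in order
def chunk2 : List String → List (List Char)
  | [] => []
  | [a] => [a.toList]
  | a :: b :: r => (a.toList ++ b.toList) :: chunk2 r

theorem chunk2_ne_nil (a : String) (l : List String) : chunk2 (a :: l) ≠ [] := by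
  cases l <;> simp [chunk2]

-- A's loop from a completed pair (count 2) appends a space before each further pair
theorem foldl_stepA_two (r : List String) (acc : List Char) :
    (r.foldl pvStepA (acc, 2)).1
      = acc ++ (if r = [] then [] else ' ' :: PySem.Chars.join [' '] (chunk2 r)) := by
  induction r using chunk2.induct generalizing acc with
  | case1 => simp
  | case2 a =>
      simp [List.foldl, pvStepA, chunk2, PySem.Chars.join_singleton]
  | case3 a b r ih =>
      simp only [List.foldl, pvStepA]
      norm_num
      rw [ih]
      rcases r with _ | ⟨c, r'⟩
      · simp [chunk2, PySem.Chars.join_singleton]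
      · obtain ⟨p, ps, hp⟩ := List.exists_cons_of_ne_nil (chunk2_ne_nil c r')
        simp [chunk2, hp, PySem.Chars.join_cons_cons]

-- A's whole loop computes the space-joined pairs
theorem foldl_stepA (l : List String) :
    (l.foldl pvStepA ([], 0)).1 = PySem.Chars.join [' '] (chunk2 l) := by
  rcases l with _ | ⟨a, _ | ⟨b, r⟩⟩
  · simp [chunk2, PySem.Chars.join_nil]
  · simp [List.foldl, pvStepA, chunk2, PySem.Chars.join_singleton]
  · simp only [List.foldl, pvStepA]
    norm_num
    rw [foldl_stepA_two]
    rcases r with _ | ⟨c, r'⟩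
    · simp [chunk2, PySem.Chars.join_singleton]
    · obtain ⟨p, ps, hp⟩ := List.exists_cons_of_ne_nil (chunk2_ne_nil c r')
      simp [chunk2, hp, PySem.Chars.join_cons_cons]

-- B's index-stepped chunks, reduced to pure drop/take form, are chunk2
theorem range_chunks (l : List String) :
    (List.range ((l.length + 1) / 2)).map
        (fun k => PySem.Chars.join [] (((l.drop (2 * k)).take 2).map String.toList))
      = chunk2 l := by
  induction l using chunk2.induct with
  | case1 => simp [chunk2]
  | case2 a => simp [chunk2, PySem.Chars.join_singleton, List.range_succ]
  | case3 a b r ih =>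
      simp only [List.length_cons]
      have h : (r.length + 1 + 1 + 1) / 2 = (r.length + 1) / 2 + 1 := by omega
      rw [h, List.range_succ_eq_map, List.map_cons, List.map_map]
      refine congrArg₂ _ ?_ ?_
      · simp [PySem.Chars.join_cons_cons, PySem.Chars.join_singleton]
      · rw [← ih]
        refine List.map_congr_left (fun k _ => ?_)
        have h2 : 2 * (k + 1) = 2 * k + 1 + 1 := by ring
        simp [Function.comp, h2, List.drop_succ_cons]

-- B's pairs, as char lists, are chunk2
theorem alt_pairs (l : List String) :
    ((PySem.List.pyRange 0 (l.length : Int) 2).map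
        (fun i => PySem.Str.join "" (PySem.List.slice l (some i) (some (i + 2))))).map String.toList
      = chunk2 l := by
  rw [PySem.List.pyRange_of_pos 0 (l.length : Int) (by norm_num)]
  have hcnt : (if (0 : Int) < (l.length : Int) then (((l.length : Int) - 0 + 2 - 1) / 2).toNat else 0)
      = (l.length + 1) / 2 := by
    rcases Nat.eq_zero_or_pos l.length with h | h
    · simp [h]
    · have : ((l.length : Int) - 0 + 2 - 1) = ((l.length + 1 : Nat) : Int) := by push_cast; ring
      rw [if_pos (by exact_mod_cast h), this]
      rw [show ((2 : Int)) = ((2 : Nat) : Int) from rfl, ← Int.natCast_div, Int.toNat_natCast]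
  rw [hcnt]
  simp only [List.map_map]
  rw [← range_chunks l]
  refine List.map_congr_left (fun k _ => ?_)
  have hc : (0 + 2 * (k : Int)) = ((2 * k : Nat) : Int) := by push_cast; ring
  simp only [Function.comp, hc]
  rw [PySem.Str.toList_join, show ((2 : Int)) = ((2 : Nat) : Int) from rfl,
    PySem.List.slice_natCast_add]
  simp

-- ===== VERDICT (by name: the statement is the Claim_ definition above) =====
theorem conv_big_endian_spec : Claim_equal_conv_big_endian := by
  intro l _
  show conv_big_endian l = conv_big_endian_alt l
  unfold conv_big_endian conv_big_endian_alt
  rw [foldl_stepA]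
  have hB : (conv_big_endian_alt l).toList = PySem.Chars.join [' '] (chunk2 l) := by
    unfold conv_big_endian_alt
    rw [PySem.Str.toList_join, alt_pairs]
    rfl
  unfold conv_big_endian_alt at hB
  rw [← hB, String.ofList_toList]
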